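-- pv_equiv track=rewrite | github.com/asokolowskii/Introduction-to-Computer-Science | Zestaw 3 - Tablice o większej liczbie wymiarów/Zadanie 101/101.py | zadanie101
-- ===== SOURCE A (Python) =====
-- def zadanie101(T):
--     n=len(T) #rozmiar tablicy
--     column_has_zero=[False for _ in range(n)] #sprawdzam, czy każda kolumna ma zero
--
--     for y in range(n):
--         row_has_zero=False #Czy wiersz ma zero?
--         for x in range(n):
--             if T[y][x]==0:
--                 row_has_zero=True
--                 column_has_zero[x]=1
--         # Jeśli po przejściu wiersza nie znaleziono zera, zwracamy False
--
--     for el in column_has_zero: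
--         if not el:
--             return False
--     return True
-- ===== SOURCE B (Python) =====
-- def zadanie101(T):
--     n = len(T)
--     for x in range(n):
--         found = False
--         for y in range(n):
--             if T[y][x] == 0:
--                 found = True
--                 break
--         if not found:
--             return False
--     return True
-- ===== Notes on version B (the rewrite author's own statement) =====
-- stated objective: simpler
-- what changed: Column-outer/row-inner scan that breaks as soon as a column's zero is found, replacing A's full row-by-row marking pass into a column_has_zero array followed by a second checking pass.
import Mathlib
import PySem

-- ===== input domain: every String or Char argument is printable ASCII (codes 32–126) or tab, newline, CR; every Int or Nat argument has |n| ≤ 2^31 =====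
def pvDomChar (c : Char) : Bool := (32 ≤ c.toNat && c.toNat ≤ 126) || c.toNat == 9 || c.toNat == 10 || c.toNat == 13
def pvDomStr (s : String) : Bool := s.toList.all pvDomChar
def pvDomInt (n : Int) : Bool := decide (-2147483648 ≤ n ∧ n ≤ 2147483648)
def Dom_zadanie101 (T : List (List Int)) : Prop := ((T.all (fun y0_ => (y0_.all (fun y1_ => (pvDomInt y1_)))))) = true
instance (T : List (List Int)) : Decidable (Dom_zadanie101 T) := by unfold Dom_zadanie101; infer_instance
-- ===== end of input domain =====

-- B replaces A's marking-array pass plus checking pass by a single column-outer,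
-- row-inner scan that short-circuits per column: simpler, one pass, no auxiliary array.


-- ===== PORT A =====
-- T[y][x], in range under Pre_ (defaults never reached there)
def pvEntry (T : List (List Int)) (y x : Int) : Int :=
  PySem.List.pyGetD (PySem.List.pyGetD T y []) x 1

def zadanie101 (T : List (List Int)) : Bool :=
  let n : Int := T.length
  let chz : List Bool := (PySem.List.pyRange 0 n 1).map (fun _ => false)
  let chz :=
    (PySem.List.pyRange 0 n 1).foldl (fun chz y =>
      ((PySem.List.pyRange 0 n 1).foldl
          (fun (s : List Bool × Bool) x =>
            if pvEntry T y x == 0 then (s.1.set x.toNat true, true) else s)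
          (chz, false)).1) chz
  chz.all (fun el => el)

-- ===== PORT B =====
def zadanie101_alt (T : List (List Int)) : Bool :=
  let n : Int := T.length
  (PySem.List.pyRange 0 n 1).all (fun x =>
    (PySem.List.pyRange 0 n 1).any (fun y => pvEntry T y x == 0))

-- ===== PRECONDITION & SPEC =====
-- Pre_ excludes exactly the ragged inputs on which Python A raises IndexError
-- (some row shorter than len(T)); rows may be longer, only the first n entries are read.
def Pre_zadanie101 (T : List (List Int)) : Prop :=
  ∀ r ∈ T, T.length ≤ r.length

instance (T : List (List Int)) : Decidable (Pre_zadanie101 T) := by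
  unfold Pre_zadanie101; infer_instance

def pvWitness_zadanie101 : List (List Int) := [[1, 0], [0, 3]]

def Spec_zadanie101 (T : List (List Int)) (out : Bool) : Prop := out = zadanie101_alt T
instance (T : List (List Int)) (out : Bool) : Decidable (Spec_zadanie101 T out) := by unfold Spec_zadanie101; infer_instance

-- ===== CLAIM (what is proved, stated in full; the proofs are below) =====
def Claim_equal_zadanie101 : Prop := ∀ (T : List (List Int)), Dom_zadanie101 T → Pre_zadanie101 T → Spec_zadanie101 T (zadanie101 T)

-- ===== LEMMAS AND PROOFS =====

-- the pure column-marking step, with the dead row_has_zero flag projected away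
def pvMark (p : Int → Bool) (xs : List Int) (c : List Bool) : List Bool :=
  xs.foldl (fun c x => if p x then c.set x.toNat true else c) c

theorem pvFold_fst (p : Int → Bool) (xs : List Int) (c : List Bool) (b : Bool) :
    (xs.foldl (fun (s : List Bool × Bool) x =>
        if p x then (s.1.set x.toNat true, true) else s) (c, b)).1
      = pvMark p xs c := by
  induction xs generalizing c b with
  | nil => rfl
  | cons x xs ih =>
      simp only [List.foldl_cons, pvMark, List.foldl_cons]
      by_cases h : p x = true <;> simp [h, ih, pvMark]

theorem pvMark_length (p : Int → Bool) (xs : List Int) (c : List Bool) :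
    (pvMark p xs c).length = c.length := by
  induction xs generalizing c with
  | nil => rfl
  | cons x xs ih =>
      simp only [pvMark, List.foldl_cons] at *
      by_cases h : p x = true <;> simp [h, ih]

theorem pvMark_getD (p : Int → Bool) (xs : List Int) (c : List Bool) (i : Nat)
    (hi : i < c.length) :
    (pvMark p xs c).getD i false
      = (c.getD i false || xs.any (fun x => p x && decide (x.toNat = i))) := by
  induction xs generalizing c with
  | nil => simp [pvMark]
  | cons x xs ih =>
      simp only [pvMark, List.foldl_cons, List.any_cons]
      by_cases h : p x = true
      · rw [if_pos h]
        have hrec := ih (c.set x.toNat true) (by simpa using hi)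
        rw [pvMark] at hrec
        rw [hrec]
        by_cases hx : x.toNat = i
        · subst hx
          simp [List.getD, h, hi]
        · simp [List.getD, h, hx]
      · rw [if_neg h]
        have hrec := ih c hi
        rw [pvMark] at hrec
        rw [hrec]
        simp [h]

-- the outer fold over rows, characterised pointwise
theorem pvOuter_length (T : List (List Int)) (n : Int) (ys : List Int) (c : List Bool) :
    (ys.foldl (fun c y => pvMark (fun x => pvEntry T y x == 0) (PySem.List.pyRange 0 n 1) c) c).length
      = c.length := by
  induction ys generalizing c with
  | nil => rfl
  | cons y ys ih => simp only [List.foldl_cons]; rw [ih, pvMark_length]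

theorem pvOuter_getD (T : List (List Int)) (n : Int) (ys : List Int) (c : List Bool)
    (i : Nat) (hi : i < c.length) :
    (ys.foldl (fun c y => pvMark (fun x => pvEntry T y x == 0) (PySem.List.pyRange 0 n 1) c) c).getD i false
      = (c.getD i false || ys.any (fun y =>
          (PySem.List.pyRange 0 n 1).any (fun x => (pvEntry T y x == 0) && decide (x.toNat = i)))) := by
  induction ys generalizing c with
  | nil => simp
  | cons y ys ih =>
      simp only [List.foldl_cons, List.any_cons]
      rw [ih (pvMark (fun x => pvEntry T y x == 0) (PySem.List.pyRange 0 n 1) c)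
            (by rw [pvMark_length]; exact hi),
          pvMark_getD _ _ _ _ hi, Bool.or_assoc]

-- collapse the per-row inner any (x must equal i) to a single entry test
theorem pvAny_range_eq (q : Int → Bool) (n : Int) (i : Nat) (hi : (i : Int) < n) :
    (PySem.List.pyRange 0 n 1).any (fun x => q x && decide (x.toNat = i)) = q (i : Int) := by
  rw [PySem.List.pyRange_one]
  simp only [List.any_map, zero_add]
  cases hq : q (i : Int)
  · rw [List.any_eq_false]
    intro k hk
    by_cases hki : k = i
    · subst hki; simp [hq]
    · simp [hki]
  · rw [List.any_eq_true]
    exact ⟨i, List.mem_range.mpr (by omega), by simp [hq]⟩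

-- A's marked column array
def pvCols (T : List (List Int)) : List Bool :=
  (PySem.List.pyRange 0 (T.length : Int) 1).foldl
    (fun c y => pvMark (fun x => pvEntry T y x == 0) (PySem.List.pyRange 0 (T.length : Int) 1) c)
    ((PySem.List.pyRange 0 (T.length : Int) 1).map (fun _ => false))

theorem pvCols_length (T : List (List Int)) : (pvCols T).length = T.length := by
  rw [pvCols, pvOuter_length]
  simp [PySem.List.length_pyRange_one]

theorem pvCols_getD (T : List (List Int)) (i : Nat) (hi : i < T.length) :
    (pvCols T).getD i false
      = (PySem.List.pyRange 0 (T.length : Int) 1).any (fun y => pvEntry T y (i : Int) == 0) := by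
  have hlen : ((PySem.List.pyRange 0 (T.length : Int) 1).map (fun _ => false) : List Bool).length
      = T.length := by simp [PySem.List.length_pyRange_one]
  rw [pvCols, pvOuter_getD T _ _ _ i (by rw [hlen]; exact hi)]
  have h0 : ((PySem.List.pyRange 0 (T.length : Int) 1).map (fun _ => false) : List Bool).getD i false
      = false := by
    cases h : ((PySem.List.pyRange 0 (T.length : Int) 1).map (fun _ => false) : List Bool)[i]? <;>
      simp [List.getD]
  rw [h0, Bool.false_or]
  congr 1
  funext y
  exact pvAny_range_eq (fun x => pvEntry T y x == 0) (T.length : Int) i (by exact_mod_cast hi)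

theorem zadanie101_eq_cols (T : List (List Int)) :
    zadanie101 T = (pvCols T).all (fun el => el) := by
  unfold zadanie101 pvCols
  dsimp only
  congr 1
  apply PySem.List.foldl_congr_mem
  intro c y _
  exact pvFold_fst _ _ _ _

-- ===== VERDICT (by name: the statement is the Claim_ definition above) =====
theorem zadanie101_spec : Claim_equal_zadanie101 := by
  unfold Claim_equal_zadanie101 Spec_zadanie101
  intro T _ _
  rw [zadanie101_eq_cols]
  unfold zadanie101_alt
  rw [Bool.eq_iff_iff, List.all_eq_true, List.all_eq_true]
  constructor
  · intro hL x hx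
    obtain ⟨hx0, hxn⟩ := (PySem.List.mem_pyRange_one).mp hx
    have hi : x.toNat < T.length := by omega
    have := pvCols_getD T x.toNat hi
    rw [List.getD_eq_getElem _ _ (by rw [pvCols_length]; exact hi)] at this
    have hmem := hL _ (List.getElem_mem (by rw [pvCols_length]; exact hi))
    rw [hmem] at this
    rw [show ((x.toNat : Int)) = x by omega] at this
    exact this.symm
  · intro hR el hel
    obtain ⟨i, hil, hie⟩ := List.mem_iff_getElem.mp hel
    have hi : i < T.length := by rw [pvCols_length] at hil; exact hil
    have := pvCols_getD T i hi
    rw [List.getD_eq_getElem _ _ hil, hie] at this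
    rw [this]
    exact hR _ ((PySem.List.mem_pyRange_one).mpr ⟨by omega, by exact_mod_cast hi⟩)
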